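-- pv_equiv track=rewrite | github.com/RyKaT07/mcp-brain | mcp_brain/server.py | _extract_h2_section
-- ===== SOURCE A (Python) =====
-- def _extract_h2_section(markdown: str, title: str) -> str:
--     """Extract the body of a specific H2 section from a markdown document.
--
--     Returns the lines between `## {title}` and the next `## ...` (or EOF),
--     excluding the `## {title}` header itself. Matching is case-insensitive
--     on the title text; whitespace around the `## ` prefix is tolerated but
--     the heading must be H2 (not H1 or H3).
--
--     Empty string if the section is missing. Used to pull targeted
--     subsections out of the user's `_meta/write-policy.md` for injection
--     into specific tool descriptions — see `_load_tool_policy` below.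
--     """
--     target = title.strip().lower()
--     in_section = False
--     buf: list[str] = []
--     for line in markdown.splitlines():
--         if line.startswith("## "):
--             heading = line[3:].strip().lower()
--             if in_section:
--                 break  # next H2 ends the section
--             if heading == target:
--                 in_section = True
--                 continue
--         if in_section:
--             buf.append(line)
--     return "\n".join(buf).strip()
-- ===== SOURCE B (Python) =====
-- def _extract_h2_section(markdown: str, title: str) -> str:
--     lines = markdown.splitlines()
--     target = title.strip().lower()
--     start = None
--     for i, line in enumerate(lines):
--         if line.startswith("## ") and line[3:].strip().lower() == target:
--             start = i + 1
--             break
--     if start is None: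
--         return ""
--     end = len(lines)
--     for j in range(start, len(lines)):
--         if lines[j].startswith("## "):
--             end = j
--             break
--     return "\n".join(lines[start:end]).strip()
-- ===== Notes on version B (the rewrite author's own statement) =====
-- stated objective: alternative
-- what changed: Replaces the single state-machine pass (in_section flag + accumulating buffer) with a locate-then-slice decomposition: find the header line's index, find the next H2 index, then join a slice of the line list.
import Mathlib
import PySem

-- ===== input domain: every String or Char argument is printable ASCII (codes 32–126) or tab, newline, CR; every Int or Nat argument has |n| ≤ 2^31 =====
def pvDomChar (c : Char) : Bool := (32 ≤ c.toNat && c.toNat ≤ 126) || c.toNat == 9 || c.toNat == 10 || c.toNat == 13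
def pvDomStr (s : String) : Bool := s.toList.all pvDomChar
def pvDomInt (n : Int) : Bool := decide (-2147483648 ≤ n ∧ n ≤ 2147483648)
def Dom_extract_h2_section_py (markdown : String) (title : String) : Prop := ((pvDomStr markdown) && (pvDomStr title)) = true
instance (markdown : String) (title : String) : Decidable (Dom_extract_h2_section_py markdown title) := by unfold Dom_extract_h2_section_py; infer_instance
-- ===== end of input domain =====

-- B replaces A's one-pass state machine by a locate-then-slice decomposition (same cost, no speed claim).

-- ===== PORT A =====
-- loop state: (in_section, buf, stopped); `stopped` models the `break`
def pvStepA (target : String) (st : Bool × List String × Bool) (line : String) : Bool × List String × Bool :=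
  if st.2.2 then st
  else if PySem.Str.startswith line "## " then
    if st.1 then (st.1, st.2.1, true)
    else if PySem.Str.lower (PySem.Str.strip (PySem.Str.slice line (some 3) none)) = target then
      (true, st.2.1, false)
    else st
  else if st.1 then (st.1, st.2.1 ++ [line], false)
  else st

def extract_h2_section_py (markdown : String) (title : String) : String :=
  let target := PySem.Str.lower (PySem.Str.strip title)
  let final := (PySem.Str.splitlines markdown).foldl (pvStepA target) (false, [], false)
  PySem.Str.strip (PySem.Str.join "\n" final.2.1)

-- ===== PORT B =====
-- phase one: index just past the first `## {target}` line (none if missing)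
def pvFindStartB (target : String) : List String → Nat → Option Nat
  | [], _ => none
  | l :: ls, i =>
    if PySem.Str.startswith l "## " &&
       (PySem.Str.lower (PySem.Str.strip (PySem.Str.slice l (some 3) none)) == target) then
      some (i + 1)
    else pvFindStartB target ls (i + 1)

-- phase two: index of the first later `## ` line (dflt = len(lines) if none)
def pvFindEndB : List String → Nat → Nat → Nat
  | [], _, dflt => dflt
  | l :: ls, j, dflt => if PySem.Str.startswith l "## " then j else pvFindEndB ls (j + 1) dflt

def extract_h2_section_py_alt (markdown : String) (title : String) : String :=
  let lines := PySem.Str.splitlines markdown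
  let target := PySem.Str.lower (PySem.Str.strip title)
  match pvFindStartB target lines 0 with
  | none => ""
  | some start =>
    let stop := pvFindEndB (lines.drop start) start lines.length
    PySem.Str.strip (PySem.Str.join "\n" (PySem.List.slice lines (some (start : Int)) (some (stop : Int))))

-- ===== PRECONDITION & SPEC =====
def Spec_extract_h2_section_py (markdown : String) (title : String) (out : String) : Prop := out = extract_h2_section_py_alt markdown title
instance (markdown : String) (title : String) (out : String) : Decidable (Spec_extract_h2_section_py markdown title out) := by unfold Spec_extract_h2_section_py; infer_instance

-- ===== CLAIM (what is proved, stated in full; the proofs are below) =====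
def Claim_equal_extract_h2_section_py : Prop := ∀ (markdown : String) (title : String), Dom_extract_h2_section_py markdown title → Spec_extract_h2_section_py markdown title (extract_h2_section_py markdown title)

-- ===== LEMMAS AND PROOFS =====
def pvH2 (l : String) : Bool := PySem.Str.startswith l "## "
def pvHit (target l : String) : Bool :=
  PySem.Str.startswith l "## " &&
    (PySem.Str.lower (PySem.Str.strip (PySem.Str.slice l (some 3) none)) == target)

theorem foldA_stopped (target : String) (ls : List String) (ins : Bool) (buf : List String) :
    ls.foldl (pvStepA target) (ins, buf, true) = (ins, buf, true) := by
  induction ls with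
  | nil => rfl
  | cons l ls ih => simp [pvStepA, ih]

theorem foldA_in (target : String) (ls : List String) (buf : List String) :
    (ls.foldl (pvStepA target) (true, buf, false)).2.1
      = buf ++ ls.takeWhile (fun l => !pvH2 l) := by
  induction ls generalizing buf with
  | nil => simp
  | cons l ls ih =>
    rw [List.foldl_cons, List.takeWhile_cons]
    cases h2 : PySem.Chars.startswith l.toList ['#', '#', ' '] with
    | true =>
      have hstep : pvStepA target (true, buf, false) l = (true, buf, true) := by
        simp [pvStepA, h2]
      rw [hstep, foldA_stopped]
      simp [pvH2, h2]
    | false =>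
      have hstep : pvStepA target (true, buf, false) l = (true, buf ++ [l], false) := by
        simp [pvStepA, h2]
      rw [hstep, ih]
      simp [pvH2, h2]

theorem foldA_search (target : String) (ls : List String) :
    (ls.foldl (pvStepA target) (false, [], false)).2.1
      = match ls.findIdx? (pvHit target) with
        | none => []
        | some i => (ls.drop (i+1)).takeWhile (fun l => !pvH2 l) := by
  induction ls with
  | nil => rfl
  | cons l ls ih =>
    rw [List.foldl_cons, List.findIdx?_cons]
    cases h2 : PySem.Chars.startswith l.toList ['#', '#', ' '] with
    | false =>
      have hstep : pvStepA target (false, [], false) l = (false, [], false) := by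
        simp [pvStepA, h2]
      have hhit : pvHit target l = false := by simp [pvHit, h2]
      rw [hstep, ih, hhit]
      cases hfi : ls.findIdx? (pvHit target) <;> simp [hfi]
    | true =>
      by_cases heq : PySem.Str.lower (PySem.Str.strip (PySem.Str.slice l (some 3) none)) = target
      · have hstep : pvStepA target (false, [], false) l = (true, [], false) := by
          simp [pvStepA, h2, heq]
        have hhit : pvHit target l = true := by simp [pvHit, h2, heq]
        rw [hstep, hhit]
        simp [foldA_in]
      · have hstep : pvStepA target (false, [], false) l = (false, [], false) := by
          simp [pvStepA, h2, heq]
        have hhit : pvHit target l = false := by simp [pvHit, h2, heq]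
        rw [hstep, ih, hhit]
        cases hfi : ls.findIdx? (pvHit target) <;> simp [hfi]

theorem findStartB_eq (target : String) (ls : List String) (i : Nat) :
    pvFindStartB target ls i = (ls.findIdx? (pvHit target)).map (fun k => i + k + 1) := by
  induction ls generalizing i with
  | nil => rfl
  | cons l ls ih =>
    rw [List.findIdx?_cons]
    have hunf : pvFindStartB target (l :: ls) i
        = if pvHit target l = true then some (i + 1) else pvFindStartB target ls (i + 1) := rfl
    cases hh : pvHit target l with
    | true => simp [hunf, hh]
    | false =>
      rw [hunf, if_neg (by simp [hh]), ih]
      cases hfi : ls.findIdx? (pvHit target) <;> simp [hfi] <;> omega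

theorem findEndB_eq (ls : List String) (j : Nat) :
    pvFindEndB ls j (j + ls.length) = j + (ls.takeWhile (fun l => !pvH2 l)).length := by
  induction ls generalizing j with
  | nil => rfl
  | cons l ls ih =>
    rw [List.takeWhile_cons]
    cases h2 : PySem.Chars.startswith l.toList ['#', '#', ' '] with
    | true =>
      have hunf : pvFindEndB (l :: ls) j (j + (l :: ls).length) = j := by
        simp [pvFindEndB, h2]
      rw [hunf]
      simp [pvH2, h2]
    | false =>
      have hunf : pvFindEndB (l :: ls) j (j + (l :: ls).length)
          = pvFindEndB ls (j + 1) ((j + 1) + ls.length) := by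
        simp only [List.length_cons]
        rw [show j + (ls.length + 1) = (j + 1) + ls.length from by omega]
        simp [pvFindEndB, h2]
      rw [hunf, ih]
      simp [pvH2, h2]
      omega

-- ===== VERDICT (by name: the statement is the Claim_ definition above) =====
theorem extract_h2_section_py_spec : Claim_equal_extract_h2_section_py := by
  intro markdown title _
  unfold Spec_extract_h2_section_py extract_h2_section_py extract_h2_section_py_alt
  set lines := PySem.Str.splitlines markdown with hl
  set target := PySem.Str.lower (PySem.Str.strip title) with ht
  dsimp only
  rw [findStartB_eq, foldA_search]
  cases hfi : lines.findIdx? (pvHit target) with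
  | none => simp [PySem.Str.join, PySem.Str.strip, PySem.Chars.strip, PySem.Chars.lstrip, PySem.Chars.rstrip]
  | some i =>
    have hi : i < lines.length := by
      have := List.findIdx?_eq_some_iff_findIdx_eq.mp hfi
      exact this.1
    simp only [Option.map_some, Nat.zero_add]
    rw [show lines.length = (i + 1) + (lines.drop (i+1)).length from by
      simp only [List.length_drop]; omega]
    rw [findEndB_eq]
    set tw := (lines.drop (i+1)).takeWhile (fun l => !pvH2 l) with htw
    have hslice : PySem.List.slice lines (some ((i + 1 : Nat) : Int)) (some (((i + 1) + tw.length : Nat) : Int)) = tw := by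
      rw [PySem.List.slice_natCast]
      have hpre : tw <+: lines.drop (i+1) := htw ▸ List.takeWhile_prefix _
      have h : (i + 1) + tw.length - (i + 1) = tw.length := by omega
      rw [h]
      exact (List.prefix_iff_eq_take.mp hpre).symm
    rw [hslice]
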